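-- pv_equiv track=rewrite | github.com/BaseballBinder/BaseballBinder | backend/main.py | normalize_preview_url
-- ===== SOURCE A (Python) =====
-- from typing import Optional, List
--
-- def normalize_preview_url(url: Optional[str]) -> Optional[str]:
--     if not url:
--         return url
--     upgraded = url
--     replacements = ["s-l64", "s-l75", "s-l96", "s-l140", "s-l150", "s-l200", "s-l320", "s-l400", "s-l500"]
--     for token in replacements:
--         if token in upgraded:
--             upgraded = upgraded.replace(token, "s-l800")
--     return upgraded
-- ===== SOURCE B (Python) =====
-- from typing import Optional
--
-- _SIZES = ("64", "75", "96", "140", "150", "200", "320", "400", "500")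
--
--
-- def normalize_preview_url(url: Optional[str]) -> Optional[str]:
--     if not url:
--         return url
--     out = []
--     i = 0
--     while i < len(url):
--         if url.startswith("s-l", i):
--             d = next((d for d in _SIZES if url.startswith(d, i + 3)), None)
--             if d is not None:
--                 out.append("s-l800")
--                 i += 3 + len(d)
--                 continue
--         out.append(url[i])
--         i += 1
--     return "".join(out)
-- ===== Notes on version B (the rewrite author's own statement) =====
-- stated objective: alternative
-- what changed: Replaced nine sequential full-string .replace passes (one per size token) by a single left-to-right scan that recognizes 's-l' plus the first matching size in place and rewrites it to 's-l800'.
import Mathlib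
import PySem

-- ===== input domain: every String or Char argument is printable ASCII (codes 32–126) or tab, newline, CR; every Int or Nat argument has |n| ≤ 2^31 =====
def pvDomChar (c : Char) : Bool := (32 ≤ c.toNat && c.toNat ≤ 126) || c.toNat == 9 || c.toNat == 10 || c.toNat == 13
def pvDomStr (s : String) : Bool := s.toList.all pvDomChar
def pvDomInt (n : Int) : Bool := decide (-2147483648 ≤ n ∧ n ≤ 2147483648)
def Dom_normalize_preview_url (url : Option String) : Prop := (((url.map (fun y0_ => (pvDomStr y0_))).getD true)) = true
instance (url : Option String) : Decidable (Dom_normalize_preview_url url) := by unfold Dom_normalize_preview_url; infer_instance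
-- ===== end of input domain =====

-- B replaces A's nine sequential full-string .replace passes by a single left-to-right scan
-- that rewrites each size token in place (objective: alternative single-pass algorithm).


-- ===== PORT A =====
-- A's token list, in A's order
def pvToksA : List String :=
  ["s-l64", "s-l75", "s-l96", "s-l140", "s-l150", "s-l200", "s-l320", "s-l400", "s-l500"]

def normalize_preview_url (url : Option String) : Option String :=
  match url with
  | none => none                      -- `if not url: return url`
  | some u =>
    if u = "" then some u             -- `if not url: return url`
    else
      -- for token in replacements: if token in upgraded: upgraded = upgraded.replace(token, "s-l800")
      some (pvToksA.foldl
        (fun upgraded token =>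
          if PySem.Str.isIn token upgraded then PySem.Str.replace upgraded token "s-l800"
          else upgraded) u)

-- ===== PORT B =====
-- the tuple _SIZES of Source B, as char lists
def pvSizes : List (List Char) :=
  [['6','4'], ['7','5'], ['9','6'], ['1','4','0'], ['1','5','0'],
   ['2','0','0'], ['3','2','0'], ['4','0','0'], ['5','0','0']]

-- Source B's while-loop: one left-to-right scan; at an "s-l" the first matching size
-- (next(...) = List.find?) is upgraded to "s-l800" and skipped, otherwise one char is copied.
def pvScan : List Char → List Char
  | [] => []
  | c :: t =>
    if (['s','-','l'] : List Char).isPrefixOf (c :: t) then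
      match pvSizes.find? (fun d => d.isPrefixOf ((c :: t).drop 3)) with
      | some d => ['s','-','l','8','0','0'] ++ pvScan ((c :: t).drop (3 + d.length))
      | none => c :: pvScan t
    else c :: pvScan t
termination_by s => s.length
decreasing_by
  all_goals (simp; try omega)

def normalize_preview_url_alt (url : Option String) : Option String :=
  match url with
  | none => none                      -- `if not url: return url`
  | some u =>
    if u = "" then some u
    else some (String.ofList (pvScan u.toList))   -- "".join(out)

-- ===== PRECONDITION & SPEC =====
def Spec_normalize_preview_url (url : Option String) (out : Option String) : Prop := out = normalize_preview_url_alt url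
instance (url : Option String) (out : Option String) : Decidable (Spec_normalize_preview_url url out) := by unfold Spec_normalize_preview_url; infer_instance

-- ===== CLAIM (what is proved, stated in full; the proofs are below) =====
def Claim_equal_normalize_preview_url : Prop := ∀ (url : Option String), Dom_normalize_preview_url url → Spec_normalize_preview_url url (normalize_preview_url url)

-- ===== LEMMAS AND PROOFS =====

def pvNEW : List Char := ['s','-','l','8','0','0']
def pvRep (old : List Char) : List Char → List Char
  | [] => []
  | c :: t =>
    if old.isPrefixOf (c :: t) then pvNEW ++ pvRep old (t.drop (old.length - 1))
    else c :: pvRep old t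
termination_by s => s.length
decreasing_by
  all_goals (simp; try omega)

theorem pvGo_spec (old : List Char) (hold : old ≠ []) :
    ∀ fuel l acc, l.length ≤ fuel →
      PySem.Chars.replace.go old pvNEW fuel l acc = acc.reverse ++ pvRep old l := by
  intro fuel
  induction fuel with
  | zero =>
    intro l acc hl
    have : l = [] := by simpa using List.length_eq_zero_iff.mp (Nat.le_zero.mp hl)
    subst this
    simp [PySem.Chars.replace.go, pvRep]
  | succ n ih =>
    intro l acc hl
    match l with
    | [] => simp [PySem.Chars.replace.go, pvRep]
    | c :: t =>
      rw [PySem.Chars.replace.go]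
      have hl' : t.length + 1 ≤ n + 1 := by simpa using hl
      obtain ⟨k, hk⟩ : ∃ k, old.length = k + 1 := ⟨old.length - 1, by
        have := List.length_pos_iff.mpr hold; omega⟩
      by_cases hp : old.isPrefixOf (c :: t)
      · rw [if_pos hp]
        rw [ih _ _ (by simp only [List.length_drop, List.length_cons]; omega)]
        rw [pvRep]
        rw [if_pos hp]
        simp [hk]
      · rw [if_neg hp]
        rw [ih _ _ (by omega)]
        rw [pvRep]
        rw [if_neg hp]
        simp

theorem pvReplace_eq (old : List Char) (hold : old ≠ []) (s : List Char) :
    PySem.Chars.replace s old pvNEW = pvRep old s := by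
  rw [PySem.Chars.replace]
  simp [List.isEmpty_eq_false_iff.mpr hold ]
  rw [pvGo_spec old hold s.length s [] le_rfl]
  simp

theorem pvRep_not_infix (old s : List Char) (h : ¬ old <:+: s) : pvRep old s = s := by
  induction s with
  | nil => rw [pvRep]
  | cons c t ih =>
    rw [pvRep]
    have hp : ¬ old.isPrefixOf (c :: t) := by
      intro hpf
      exact h (List.IsPrefix.isInfix (List.isPrefixOf_iff_prefix.mp hpf))
    rw [if_neg hp]
    rw [ih (fun hin => h (hin.trans (List.suffix_cons c t).isInfix))]

def pvToksC : List (List Char) :=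
  [['s','-','l','6','4'], ['s','-','l','7','5'], ['s','-','l','9','6'],
   ['s','-','l','1','4','0'], ['s','-','l','1','5','0'], ['s','-','l','2','0','0'],
   ['s','-','l','3','2','0'], ['s','-','l','4','0','0'], ['s','-','l','5','0','0']]
def pvFold (cs : List Char) : List Char := pvToksC.foldl (fun u T => pvRep T u) cs

-- no character of pvRep's output that was copied from the input is created or destroyed:
-- a prefix not containing 's' of (pvRep old t) is a prefix of t itself
theorem pvPres (old : List Char) :
    ∀ t p, 's' ∉ p → p <+: pvRep old t → p <+: t := by
  intro t
  induction t using pvRep.induct old with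
  | case1 =>
    intro p _ hp
    rw [pvRep] at hp
    simpa using hp
  | case2 c t hpre ih =>
    intro p hs hp
    rw [pvRep, if_pos hpre] at hp
    rcases List.prefix_cons_iff.mp hp with h | ⟨q, hq, _⟩
    · simp [h]
    · exact absurd (hq ▸ List.mem_cons_self) hs
  | case3 c t hpre ih =>
    intro p hs hp
    rw [pvRep, if_neg hpre] at hp
    rcases List.prefix_cons_iff.mp hp with h | ⟨q, hq, hq'⟩
    · simp [h]
    · subst hq
      have hs' : 's' ∉ q := fun h => hs (List.mem_cons_of_mem _ h)
      exact List.cons_prefix_cons.mpr ⟨rfl, ih q hs' hq'⟩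

-- a token that was not a prefix of c :: t is still not a prefix after a replace in t
theorem pvConsStep (old T : List Char) (hne : T ≠ []) (hs : 's' ∉ T.tail)
    (c : Char) (t : List Char) (h : ¬ T <+: c :: t) : ¬ T <+: c :: pvRep old t := by
  intro hT
  match T, hne with
  | c0 :: p, _ =>
    rcases List.cons_prefix_cons.mp hT with ⟨rfl, hq⟩
    exact h (List.cons_prefix_cons.mpr ⟨rfl, pvPres old t p hs hq⟩)

-- folding replaces over a string none of whose tokens matches at the head keeps the head char
theorem pvConsFold (toks : List (List Char)) (hw : ∀ T ∈ toks, T ≠ [] ∧ 's' ∉ T.tail) :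
    ∀ t c, (∀ T ∈ toks, ¬ T <+: c :: t) →
      toks.foldl (fun u T => pvRep T u) (c :: t) = c :: toks.foldl (fun u T => pvRep T u) t := by
  induction toks with
  | nil => intro t c _; rfl
  | cons T0 rest ih =>
    intro t c h
    simp only [List.foldl_cons]
    have h0 : ¬ T0.isPrefixOf (c :: t) := by
      intro hp
      exact h T0 List.mem_cons_self (List.isPrefixOf_iff_prefix.mp hp)
    rw [pvRep, if_neg h0]
    exact ih (fun T hT => hw T (List.mem_cons_of_mem _ hT)) (pvRep T0 t) c
      (fun T hT => pvConsStep T0 T (hw T (List.mem_cons_of_mem _ hT)).1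
        (hw T (List.mem_cons_of_mem _ hT)).2 c t (h T (List.mem_cons_of_mem _ hT)))

set_option maxHeartbeats 2000000 in
theorem pvPull (T : List Char) (hT : T ∈ pvToksC) (K : List Char) (hK : K ∈ pvToksC)
    (hne : T ≠ K) (r : List Char) : pvRep T (K ++ r) = K ++ pvRep T r := by
  fin_cases hT <;> fin_cases hK <;>
    first
      | (exfalso; exact hne rfl)
      | simp [pvRep, List.isPrefixOf]

set_option maxHeartbeats 1000000 in
theorem pvPush (T : List Char) (hT : T ∈ pvToksC) (r : List Char) :
    pvRep T (pvNEW ++ r) = pvNEW ++ pvRep T r := by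
  fin_cases hT <;> simp [pvRep, pvNEW, List.isPrefixOf]

set_option maxHeartbeats 1000000 in
theorem pvSelf (K : List Char) (hK : K ∈ pvToksC) (r : List Char) :
    pvRep K (K ++ r) = pvNEW ++ pvRep K r := by
  fin_cases hK <;> simp [pvRep, List.isPrefixOf]

theorem pvFoldlPull (K : List Char) (hK : K ∈ pvToksC) :
    ∀ (ts : List (List Char)), (∀ T ∈ ts, T ∈ pvToksC ∧ T ≠ K) →
      ∀ r, ts.foldl (fun u T => pvRep T u) (K ++ r) = K ++ ts.foldl (fun u T => pvRep T u) r := by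
  intro ts
  induction ts with
  | nil => intro _ r; rfl
  | cons T0 rest ih =>
    intro h r
    simp only [List.foldl_cons]
    rw [pvPull T0 (h T0 List.mem_cons_self).1 K hK (h T0 List.mem_cons_self).2]
    exact ih (fun T hT => h T (List.mem_cons_of_mem _ hT)) (pvRep T0 r)

theorem pvFoldlPush :
    ∀ (ts : List (List Char)), (∀ T ∈ ts, T ∈ pvToksC) →
      ∀ r, ts.foldl (fun u T => pvRep T u) (pvNEW ++ r) = pvNEW ++ ts.foldl (fun u T => pvRep T u) r := by
  intro ts
  induction ts with
  | nil => intro _ r; rfl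
  | cons T0 rest ih =>
    intro h r
    simp only [List.foldl_cons]
    rw [pvPush T0 (h T0 List.mem_cons_self)]
    exact ih (fun T hT => h T (List.mem_cons_of_mem _ hT)) (pvRep T0 r)

theorem pvToksC_wellformed : ∀ T ∈ pvToksC, T ≠ [] ∧ 's' ∉ T.tail := by decide

theorem pvToksC_sl_prefix : ∀ T ∈ pvToksC, ['s','-','l'] <+: T := by decide

theorem pvToksC_map : pvSizes.map (fun d => 's' :: '-' :: 'l' :: d) = pvToksC := by rfl

theorem pvFold_nil : pvFold [] = [] := by
  simp [pvFold, pvToksC, pvRep]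

theorem pvMain : ∀ cs, pvFold cs = pvScan cs := by
  intro cs
  induction cs using pvScan.induct with
  | case1 => rw [pvScan]; exact pvFold_nil
  | case2 c t hpre d hfind ih =>
    obtain ⟨hd, as, bs, hdec, has⟩ := List.find?_eq_some_iff_append.mp hfind
    rcases List.isPrefixOf_iff_prefix.mp hpre with ⟨rest, hr⟩
    have hrest3 : (c :: t).drop 3 = rest := by rw [← hr]; rfl
    rw [hrest3] at hd
    rcases List.isPrefixOf_iff_prefix.mp hd with ⟨r, hdr⟩
    have hdmem : d ∈ pvSizes := by rw [hdec]; exact List.mem_append_right _ List.mem_cons_self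
    have hK : ('s' :: '-' :: 'l' :: d) ∈ pvToksC := by
      rw [← pvToksC_map]; exact List.mem_map_of_mem hdmem
    have hsplit : c :: t = ('s' :: '-' :: 'l' :: d) ++ r := by
      rw [← hr, ← hdr]; rfl
    have htoks : pvToksC =
        as.map (fun d => 's' :: '-' :: 'l' :: d) ++ ('s' :: '-' :: 'l' :: d) ::
          bs.map (fun d => 's' :: '-' :: 'l' :: d) := by
      rw [← pvToksC_map, hdec]; simp
    have hasmem : ∀ T ∈ as.map (fun d => 's' :: '-' :: 'l' :: d),
        T ∈ pvToksC ∧ T ≠ 's' :: '-' :: 'l' :: d := by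
      intro T hT
      refine ⟨by rw [htoks]; exact List.mem_append_left _ hT, ?_⟩
      rcases List.mem_map.mp hT with ⟨x, hx, rfl⟩
      intro habs
      have hxd : x = d := by injection habs; simp_all
      have := has x hx
      rw [hxd] at this
      have hdd : d.isPrefixOf rest = true := hd
      simp [hrest3, hdd] at this
    have hbsmem : ∀ T ∈ bs.map (fun d => 's' :: '-' :: 'l' :: d), T ∈ pvToksC := by
      intro T hT
      rw [htoks]
      exact List.mem_append_right _ (List.mem_cons_of_mem _ hT)
    have hdropr : (c :: t).drop (3 + d.length) = r := by
      rw [hsplit]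
      have : (('s' :: '-' :: 'l' :: d) : List Char).length = 3 + d.length := by
        simp; omega
      rw [List.drop_left' this]
    have hfoldeq : pvFold (c :: t) = pvNEW ++ pvFold r := by
      rw [pvFold, pvFold, htoks, hsplit]
      rw [List.foldl_append, List.foldl_append]
      rw [pvFoldlPull _ hK _ hasmem]
      simp only [List.foldl_cons]
      rw [pvSelf _ hK]
      rw [pvFoldlPush _ hbsmem]
    rw [hfoldeq]
    rw [pvScan, if_pos hpre]
    simp only [hfind]
    rw [hdropr, ← hdropr, ih, hdropr]
    rfl
  | case3 c t hpre hfind ih =>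
    have hrest : (c :: t).drop 3 = t.drop 2 := by simp
    have hnone := List.find?_eq_none.mp hfind
    have hnot : ∀ T ∈ pvToksC, ¬ T <+: c :: t := by
      intro T hT habs
      rw [← pvToksC_map] at hT
      rcases List.mem_map.mp hT with ⟨x, hx, rfl⟩
      rcases List.isPrefixOf_iff_prefix.mp hpre with ⟨rest, hr⟩
      rw [← hr] at habs
      have : x <+: rest := by
        simpa using (List.prefix_append_right_inj (['s','-','l'] : List Char)).mp habs
      have hx3 : rest = (c :: t).drop 3 := by rw [← hr]; rfl
      exact hnone x hx (List.isPrefixOf_iff_prefix.mpr (hx3 ▸ this))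
    rw [pvScan, if_pos hpre]
    simp only [hfind]
    rw [pvFold, pvConsFold pvToksC pvToksC_wellformed t c hnot, ← pvFold, ih]
  | case4 c t hpre ih =>
    have hnot : ∀ T ∈ pvToksC, ¬ T <+: c :: t := by
      intro T hT habs
      exact hpre (List.isPrefixOf_iff_prefix.mpr ((pvToksC_sl_prefix T hT).trans habs))
    rw [pvScan, if_neg hpre]
    rw [pvFold, pvConsFold pvToksC pvToksC_wellformed t c hnot, ← pvFold, ih]

theorem pvStep_toList (tok : String) (htok : tok.toList ≠ []) (u : String) :
    (if PySem.Str.isIn tok u then PySem.Str.replace u tok "s-l800" else u).toList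
      = pvRep tok.toList u.toList := by
  by_cases h : PySem.Str.isIn tok u
  · rw [if_pos h, PySem.Str.toList_replace]
    have hn : ("s-l800" : String).toList = pvNEW := by rfl
    rw [hn, pvReplace_eq _ htok]
  · rw [if_neg h]
    have h' : PySem.Chars.isIn tok.toList u.toList = false := by
      rw [← PySem.Str.isIn_eq]; simpa using h
    exact (pvRep_not_infix _ _ ((PySem.Chars.isIn_eq_false_iff _ _).mp h')).symm

theorem pvFoldGen (toks : List String) (u : String) (h : ∀ t ∈ toks, t.toList ≠ []) :
    (toks.foldl (fun up tok => if PySem.Str.isIn tok up then PySem.Str.replace up tok "s-l800" else up) u).toList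
    = (toks.map String.toList).foldl (fun cs T => pvRep T cs) u.toList := by
  induction toks generalizing u with
  | nil => rfl
  | cons a l ih =>
    simp only [List.foldl_cons, List.map_cons]
    rw [ih _ (fun t ht => h t (List.mem_cons_of_mem a ht)),
      pvStep_toList a (h a List.mem_cons_self) u]

theorem pvFold_toList (u : String) :
    (pvToksA.foldl
      (fun upgraded token =>
        if PySem.Str.isIn token upgraded then PySem.Str.replace upgraded token "s-l800"
        else upgraded) u).toList = pvFold u.toList := by
  rw [pvFoldGen _ _ (by decide)]
  rfl

-- ===== VERDICT (by name: the statement is the Claim_ definition above) =====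
theorem normalize_preview_url_spec : Claim_equal_normalize_preview_url := by
  intro url _
  unfold Spec_normalize_preview_url
  match url with
  | none => rfl
  | some u =>
    by_cases hu : u = ""
    · simp [normalize_preview_url, normalize_preview_url_alt, hu]
    · have hx : (pvToksA.foldl
        (fun upgraded token =>
          if PySem.Str.isIn token upgraded then PySem.Str.replace upgraded token "s-l800"
          else upgraded) u) = String.ofList (pvScan u.toList) := by
        have h := (pvFold_toList u).trans (pvMain u.toList)
        simpa using congrArg String.ofList h
      simp only [normalize_preview_url, normalize_preview_url_alt]
      rw [if_neg hu, if_neg hu, hx]
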